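-- pv_equiv track=rewrite | github.com/6210qwe/leetcode_py | leetcode_solutions/by_id/q4098.py | longest_non_decreasing_subarray
-- ===== SOURCE A (Python) =====
-- from typing import List, Optional
--
-- def longest_non_decreasing_subarray(nums: List[int]) -> int:
--     """
--     函数式接口 - 返回在执行至多一次替换后，可以获得的最长非递减子数组的长度。
--     """
--     if not nums:
--         return 0
--
--     no_replace = 1
--     one_replace = 1
--     max_length = 1
--
--     for i in range(1, len(nums)):
--         if nums[i] >= nums[i - 1]:
--             no_replace += 1
--             one_replace += 1
--         else:
--             one_replace = no_replace + 1
--             no_replace = 1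
--
--         max_length = max(max_length, no_replace, one_replace)
--
--     return max_length
-- ===== SOURCE B (Python) =====
-- def longest_non_decreasing_subarray(nums):
--     if not nums:
--         return 0
--     # pass 1: lengths of maximal non-decreasing runs
--     runs = []
--     cur = 1
--     for prev, x in zip(nums, nums[1:]):
--         if x >= prev:
--             cur += 1
--         else:
--             runs.append(cur)
--             cur = 1
--     runs.append(cur)
--     # pass 2: best = max over each run and each adjacent pair of runs merged
--     best = runs[0]
--     for p, q in zip(runs, runs[1:]):
--         best = max(best, q, p + q)
--     return best
-- ===== Notes on version B (the rewrite author's own statement) =====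
-- stated objective: alternative
-- what changed: Replaces A's single-pass two-counter DP (no_replace/one_replace) by a two-pass run decomposition: first build the list of maximal non-decreasing run lengths, then take the maximum over each run and each adjacent pair of runs merged.
import Mathlib
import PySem

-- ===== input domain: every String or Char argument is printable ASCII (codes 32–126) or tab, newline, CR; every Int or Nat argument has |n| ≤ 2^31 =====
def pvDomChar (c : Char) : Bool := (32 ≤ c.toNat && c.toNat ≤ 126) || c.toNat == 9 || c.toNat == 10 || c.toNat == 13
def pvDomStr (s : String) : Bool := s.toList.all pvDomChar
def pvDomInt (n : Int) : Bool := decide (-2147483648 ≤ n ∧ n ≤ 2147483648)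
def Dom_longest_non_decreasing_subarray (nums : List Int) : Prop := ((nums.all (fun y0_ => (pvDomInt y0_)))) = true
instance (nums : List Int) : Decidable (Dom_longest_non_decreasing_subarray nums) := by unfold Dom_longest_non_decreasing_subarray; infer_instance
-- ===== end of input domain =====

-- B replaces A's two-counter DP by a two-pass run decomposition (runs, then max over runs
-- and adjacent merged pairs): an alternative decomposition of the same O(n) computation.

-- ===== PORT A =====
-- literal port of A: state (no_replace, one_replace, max_length), loop over i in range(1, len(nums));
-- nums[i] is ported with pyGetD (the index is always in range, so Python never raises here)
def longest_non_decreasing_subarray (nums : List Int) : Int :=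
  if nums = [] then 0
  else
    let r := (PySem.List.pyRange 1 (nums.length : Int) 1).foldl
      (fun (s : Int × Int × Int) i =>
        if PySem.List.pyGetD nums i 0 ≥ PySem.List.pyGetD nums (i - 1) 0 then
          (s.1 + 1, s.2.1 + 1, max (max s.2.2 (s.1 + 1)) (s.2.1 + 1))
        else
          (1, s.1 + 1, max (max s.2.2 1) (s.1 + 1)))
      ((1 : Int), (1 : Int), (1 : Int))
    r.2.2

-- ===== PORT B =====
-- literal port of Source B: pass 1 builds the run-length list with state (runs, cur) over
-- zip(nums, nums[1:]); pass 2 folds max over zip(runs, runs[1:]) starting from runs[0]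
-- (runs is never empty, so runs[0] never raises; ported with pyGetD)
def longest_non_decreasing_subarray_alt (nums : List Int) : Int :=
  if nums = [] then 0
  else
    let rc := (nums.zip nums.tail).foldl
      (fun (rc : List Int × Int) pq =>
        if pq.2 ≥ pq.1 then (rc.1, rc.2 + 1) else (rc.1 ++ [rc.2], 1))
      (([] : List Int), (1 : Int))
    let runs := rc.1 ++ [rc.2]
    (runs.zip runs.tail).foldl
      (fun b pq => max (max b pq.2) (pq.1 + pq.2))
      (PySem.List.pyGetD runs 0 0)

-- ===== PRECONDITION & SPEC =====
def Spec_longest_non_decreasing_subarray (nums : List Int) (out : Int) : Prop := out = longest_non_decreasing_subarray_alt nums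
instance (nums : List Int) (out : Int) : Decidable (Spec_longest_non_decreasing_subarray nums out) := by unfold Spec_longest_non_decreasing_subarray; infer_instance

-- ===== CLAIM (what is proved, stated in full; the proofs are below) =====
def Claim_equal_longest_non_decreasing_subarray : Prop := ∀ (nums : List Int), Dom_longest_non_decreasing_subarray nums → Spec_longest_non_decreasing_subarray nums (longest_non_decreasing_subarray nums)

-- ===== LEMMAS AND PROOFS =====

-- structural view of A's loop state transition, prev-element recursion
def pvLoopA (prev : Int) (s : Int × Int × Int) : List Int → Int
  | [] => s.2.2
  | x :: t =>
    if x ≥ prev then pvLoopA x (s.1 + 1, s.2.1 + 1, max (max s.2.2 (s.1 + 1)) (s.2.1 + 1)) t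
    else pvLoopA x (1, s.1 + 1, max (max s.2.2 1) (s.1 + 1)) t

-- structural view of B's pass 1: run lengths of prev :: xs, with current run length cur
def pvRuns (prev cur : Int) : List Int → List Int
  | [] => [cur]
  | x :: t => if x ≥ prev then pvRuns x (cur + 1) t else cur :: pvRuns x 1 t

-- structural view of B's pass 2: p = previous run length, b = best so far
def pvBest (p b : Int) : List Int → Int
  | [] => b
  | r :: rs => pvBest r (max (max b r) (p + r)) rs

-- index fold over adjacent pairs = zip fold
theorem pv_foldl_range_adj {S : Type} (f : S → Int → Int → S) :
    ∀ (xs : List Int) (init : S),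
      (List.range (xs.length - 1)).foldl (fun s k => f s (xs.getD k 0) (xs.getD (k + 1) 0)) init
        = (xs.zip xs.tail).foldl (fun s pq => f s pq.1 pq.2) init := by
  intro xs
  induction xs with
  | nil => intro init; simp
  | cons a ys ih =>
    intro init
    cases ys with
    | nil => simp
    | cons b t =>
      have hr : List.range (t.length + 1) = 0 :: (List.range t.length).map Nat.succ :=
        List.range_succ_eq_map
      simp only [List.length_cons, Nat.add_sub_cancel] at ih ⊢
      rw [hr]
      simp only [List.foldl_cons, List.foldl_map, Nat.succ_eq_add_one, List.getD_cons_succ,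
        List.getD_cons_zero, List.zip_cons_cons, List.tail_cons]
      exact ih (f init a b)

-- A's pyRange/pyGetD fold equals the structural loop pvLoopA
theorem pv_portA_eq_loopA (a : Int) (ys : List Int) :
    ((PySem.List.pyRange 1 ((a :: ys).length : Int) 1).foldl
      (fun (s : Int × Int × Int) i =>
        if PySem.List.pyGetD (a :: ys) i 0 ≥ PySem.List.pyGetD (a :: ys) (i - 1) 0 then
          (s.1 + 1, s.2.1 + 1, max (max s.2.2 (s.1 + 1)) (s.2.1 + 1))
        else
          (1, s.1 + 1, max (max s.2.2 1) (s.1 + 1)))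
      ((1 : Int), (1 : Int), (1 : Int))).2.2 = pvLoopA a (1, 1, 1) ys := by
  -- step 1: pyRange 1 n 1 → List.range (n-1) with index shift, pyGetD → getD
  have hlen : (((a :: ys).length : Int) - 1).toNat = (a :: ys).length - 1 := by
    simp [List.length_cons]
  have h1 : (PySem.List.pyRange 1 ((a :: ys).length : Int) 1).foldl
      (fun (s : Int × Int × Int) i =>
        if PySem.List.pyGetD (a :: ys) i 0 ≥ PySem.List.pyGetD (a :: ys) (i - 1) 0 then
          (s.1 + 1, s.2.1 + 1, max (max s.2.2 (s.1 + 1)) (s.2.1 + 1))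
        else
          (1, s.1 + 1, max (max s.2.2 1) (s.1 + 1)))
      ((1 : Int), (1 : Int), (1 : Int))
      = (List.range ((a :: ys).length - 1)).foldl
        (fun (s : Int × Int × Int) k =>
          if (a :: ys).getD (k + 1) 0 ≥ (a :: ys).getD k 0 then
            (s.1 + 1, s.2.1 + 1, max (max s.2.2 (s.1 + 1)) (s.2.1 + 1))
          else
            (1, s.1 + 1, max (max s.2.2 1) (s.1 + 1)))
        ((1 : Int), (1 : Int), (1 : Int)) := by
    rw [PySem.List.pyRange_one, hlen, List.foldl_map]
    congr 1
    funext s k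
    have e1 : (1 : Int) + (k : Int) - 1 = ((k : Nat) : Int) := by omega
    have e2 : (1 : Int) + (k : Int) = (((k + 1 : Nat)) : Int) := by omega
    rw [e1, e2, PySem.List.pyGetD_natCast, PySem.List.pyGetD_natCast]
  rw [h1, pv_foldl_range_adj (fun (s : Int × Int × Int) p q =>
      if q ≥ p then (s.1 + 1, s.2.1 + 1, max (max s.2.2 (s.1 + 1)) (s.2.1 + 1))
      else (1, s.1 + 1, max (max s.2.2 1) (s.1 + 1)))]
  -- step 2: zip fold → pvLoopA
  suffices h : ∀ (xs : List Int) (prev : Int) (s : Int × Int × Int),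
      (((prev :: xs).zip xs).foldl (fun (s : Int × Int × Int) pq =>
        if pq.2 ≥ pq.1 then (s.1 + 1, s.2.1 + 1, max (max s.2.2 (s.1 + 1)) (s.2.1 + 1))
        else (1, s.1 + 1, max (max s.2.2 1) (s.1 + 1))) s).2.2 = pvLoopA prev s xs by
    simpa using h ys a (1, 1, 1)
  intro xs
  induction xs with
  | nil => intro prev s; simp [pvLoopA]
  | cons x t ih =>
    intro prev s
    simp only [List.zip_cons_cons, List.foldl_cons, pvLoopA]
    split_ifs with hx
    · exact ih x _
    · exact ih x _

-- B's pass 1 fold with accumulator equals acc ++ pvRuns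
theorem pv_runs_acc : ∀ (xs : List Int) (prev cur : Int) (acc : List Int),
    (let rc := ((prev :: xs).zip xs).foldl
        (fun (rc : List Int × Int) pq =>
          if pq.2 ≥ pq.1 then (rc.1, rc.2 + 1) else (rc.1 ++ [rc.2], 1)) (acc, cur)
     rc.1 ++ [rc.2]) = acc ++ pvRuns prev cur xs := by
  intro xs
  induction xs with
  | nil => intro prev cur acc; simp [pvRuns]
  | cons x t ih =>
    intro prev cur acc
    simp only [List.zip_cons_cons, List.foldl_cons, pvRuns]
    split_ifs with hx
    · exact ih x (cur + 1) acc
    · rw [ih x 1 (acc ++ [cur])]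
      simp

-- B's pass 2 fold equals pvBest
theorem pv_best_fold : ∀ (rest : List Int) (p b : Int),
    (((p :: rest).zip rest).foldl (fun b pq => max (max b pq.2) (pq.1 + pq.2)) b)
      = pvBest p b rest := by
  intro rest
  induction rest with
  | nil => intro p b; simp [pvBest]
  | cons r rs ih =>
    intro p b
    simp only [List.zip_cons_cons, List.foldl_cons, pvBest]
    exact ih r _

-- pvRuns is nonempty and its head is at least cur
theorem pv_runs_head : ∀ (xs : List Int) (prev cur : Int),
    ∃ r rs, pvRuns prev cur xs = r :: rs ∧ cur ≤ r := by
  intro xs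
  induction xs with
  | nil => intro prev cur; exact ⟨cur, [], rfl, le_refl _⟩
  | cons x t ih =>
    intro prev cur
    by_cases hx : x ≥ prev
    · obtain ⟨r, rs, he, hle⟩ := ih x (cur + 1)
      exact ⟨r, rs, by simp [pvRuns, hx, he], by omega⟩
    · exact ⟨cur, pvRuns x 1 t, by simp [pvRuns, hx], le_refl _⟩

-- main invariant: A's loop state (no, p+no, mx) vs B's run scan with previous run p
theorem pv_inv : ∀ (xs : List Int) (prev no p mx : Int),
    1 ≤ no → 0 ≤ p → no ≤ mx → p + no ≤ mx →
    pvLoopA prev (no, p + no, mx) xs = pvBest p mx (pvRuns prev no xs) := by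
  intro xs
  induction xs with
  | nil =>
    intro prev no p mx h1 h2 h3 h4
    simp only [pvLoopA, pvRuns, pvBest]
    omega
  | cons x t ih =>
    intro prev no p mx h1 h2 h3 h4
    by_cases hx : x ≥ prev
    · simp only [pvLoopA, pvRuns, hx, if_pos]
      have e : p + no + 1 = p + (no + 1) := by ring
      rw [e, ih x (no + 1) p _ (by omega) h2 (by omega) (by omega)]
      obtain ⟨r, rs, he, hle⟩ := pv_runs_head t x (no + 1)
      rw [he]
      simp only [pvBest]
      congr 1
      omega
    · simp only [pvLoopA, pvRuns, hx, if_neg, not_false_iff]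
      rw [show (no + 1 : Int) = no + 1 from rfl,
        ih x 1 no _ (by omega) (by omega) (by omega) (by omega)]
      obtain ⟨r, rs, he, hle⟩ := pv_runs_head t x 1
      rw [he]
      simp only [pvBest]
      congr 1
      omega

-- ===== VERDICT (by name: the statement is the Claim_ definition above) =====
theorem longest_non_decreasing_subarray_spec : Claim_equal_longest_non_decreasing_subarray := by
  intro nums _
  unfold Spec_longest_non_decreasing_subarray
  cases nums with
  | nil => rfl
  | cons a ys =>
    unfold longest_non_decreasing_subarray longest_non_decreasing_subarray_alt
    simp only [if_neg (List.cons_ne_nil a ys), List.tail_cons]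
    rw [pv_portA_eq_loopA a ys]
    rw [pv_runs_acc ys a 1 []]
    simp only [List.nil_append]
    obtain ⟨r, rs, he, hle⟩ := pv_runs_head ys a 1
    rw [he]
    have hb : pvLoopA a (1, 1, 1) ys = pvBest 0 1 (pvRuns a 1 ys) := by
      have := pv_inv ys a 1 0 1 (by omega) (by omega) (by omega) (by omega)
      simpa using this
    rw [hb, he]
    simp only [pvBest, PySem.List.pyGetD_zero_cons, List.tail_cons]
    rw [pv_best_fold rs r r]
    congr 1
    omega
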